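-- pv_equiv track=rewrite | github.com/KevinCJM/FundInvestmentResearchPlatform | backend/app.py | _coerce_filter_list
-- ===== SOURCE A (Python) =====
-- from typing import List, Optional, Tuple, Dict, Any
--
-- def _coerce_filter_list(raw: Optional[List[str]]) -> List[str]:
--     values: List[str] = []
--     if not raw:
--         return values
--     for entry in raw:
--         if entry is None:
--             continue
--         text = str(entry)
--         parts = [text] if "," not in text else text.split(",")
--         for part in parts:
--             norm = part.strip()
--             if norm:
--                 values.append(norm)
--     return values
-- ===== SOURCE B (Python) =====
-- from typing import List, Optional
--
--
-- def _coerce_filter_list(raw: Optional[List[str]]) -> List[str]: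
--     # Single-pass character tokenizer: no split/strip/join of fragments.
--     if not raw:
--         return []
--     values: List[str] = []
--     token: List[str] = []  # committed chars of the current token (never ends in whitespace)
--     ws: List[str] = []     # whitespace pending between committed chars and the next one
--     for entry in raw:
--         if entry is None:
--             continue
--         for ch in str(entry):
--             if ch == ",":
--                 if token:
--                     values.append("".join(token))
--                 token = []
--                 ws = []
--             elif ch.isspace():
--                 if token:
--                     ws.append(ch)
--             else:
--                 token += ws
--                 token.append(ch)
--                 ws = []
--         if token:
--             values.append("".join(token))
--         token = []
--         ws = []
--     return values
-- ===== Notes on version B (the rewrite author's own statement) =====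
-- stated objective: alternative
-- what changed: B replaces A's split-on-comma/strip/filter pipeline with a single-pass character-level tokenizer that maintains a token buffer and a pending-whitespace buffer, flushing on commas and at entry ends; no split or strip calls remain.
import Mathlib
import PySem

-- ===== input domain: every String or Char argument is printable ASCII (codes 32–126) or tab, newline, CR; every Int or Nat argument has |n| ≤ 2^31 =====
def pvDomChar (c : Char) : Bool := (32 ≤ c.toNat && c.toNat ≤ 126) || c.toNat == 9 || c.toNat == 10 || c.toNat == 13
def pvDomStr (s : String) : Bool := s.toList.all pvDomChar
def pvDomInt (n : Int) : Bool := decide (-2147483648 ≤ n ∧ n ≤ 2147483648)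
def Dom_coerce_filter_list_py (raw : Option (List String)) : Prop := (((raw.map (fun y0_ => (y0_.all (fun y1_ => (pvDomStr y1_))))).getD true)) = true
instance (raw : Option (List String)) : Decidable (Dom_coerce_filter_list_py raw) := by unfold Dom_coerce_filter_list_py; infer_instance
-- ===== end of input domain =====

-- B replaces A's per-entry comma-split / strip / filter pipeline with a single-pass
-- character-level tokenizer (token buffer + pending-whitespace buffer); objective: alternative.

-- ===== PORT A =====
-- Python's `entry is None` branch cannot fire for typed List String inputs and is omitted;
-- `str(entry)` on a str is the identity; `text.split(",")` has a non-empty separator, so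
-- `PySem.Str.split?` is always `some` and `.getD []` is never the fallback.
def coerce_filter_list_py (raw : Option (List String)) : List String :=
  match raw with
  | none => []
  | some l =>
    if l = [] then []   -- `if not raw`
    else
      l.foldl (fun values entry =>
        let text := entry
        let parts := if PySem.Str.isIn "," text = false then [text]
                     else (PySem.Str.split? text ",").getD []
        parts.foldl (fun values part =>
          let norm := PySem.Str.strip part
          if norm ≠ "" then values ++ [norm] else values) values) []

-- ===== PORT B =====
-- the generator-side `if entry is None: continue` is vacuous on typed List String inputs and is omitted;
-- `"".join(token)` on a list of chars is String.ofList; `ch.isspace()` is PySem.Chars.isspace.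
-- inner `for ch in str(entry)` loop of Source B: state = (values, token, ws)
def scanB : List Char → List String × List Char × List Char → List String × List Char × List Char
  | [], st => st
  | c :: rest, (values, token, ws) =>
    if c = ',' then
      scanB rest ((if token ≠ [] then values ++ [String.ofList token] else values), [], [])
    else if PySem.Chars.isspace c then
      scanB rest (values, token, if token ≠ [] then ws ++ [c] else ws)
    else
      scanB rest (values, token ++ ws ++ [c], [])

def coerce_filter_list_py_alt (raw : Option (List String)) : List String :=
  match raw with
  | none => []
  | some l =>
    if l = [] then []   -- `if not raw`
    else
      (l.foldl (fun st entry =>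
        match scanB entry.toList st with
        | (values, token, _ws) =>
          ((if token ≠ [] then values ++ [String.ofList token] else values), ([] : List Char), ([] : List Char)))
        (([] : List String), ([] : List Char), ([] : List Char))).1

-- ===== PRECONDITION & SPEC =====
def Spec_coerce_filter_list_py (raw : Option (List String)) (out : List String) : Prop := out = coerce_filter_list_py_alt raw
instance (raw : Option (List String)) (out : List String) : Decidable (Spec_coerce_filter_list_py raw out) := by unfold Spec_coerce_filter_list_py; infer_instance

-- ===== CLAIM (what is proved, stated in full; the proofs are below) =====
def Claim_equal_coerce_filter_list_py : Prop := ∀ (raw : Option (List String)), Dom_coerce_filter_list_py raw → Spec_coerce_filter_list_py raw (coerce_filter_list_py raw)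

-- ===== LEMMAS AND PROOFS =====

-- split on the single character ',' as a plain structural recursion
def mySplit : List Char → List (List Char)
  | [] => [[]]
  | c :: rest => if c = ',' then [] :: mySplit rest else (mySplit rest).modifyHead (c :: ·)

theorem mySplit_ne_nil (s : List Char) : mySplit s ≠ [] := by
  induction s with
  | nil => simp [mySplit]
  | cons c rest ih =>
    simp only [mySplit]
    split_ifs <;> simp_all [List.modifyHead]
    cases h : mySplit rest <;> simp_all

theorem splitOn_go_comma (l : List Char) : ∀ (fuel : Nat) (cur : List Char) (acc : List (List Char)),
    l.length ≤ fuel →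
    PySem.Chars.splitOn.go [','] fuel l cur acc
      = acc.reverse ++ (mySplit l).modifyHead (cur.reverse ++ ·) := by
  induction l with
  | nil =>
    intro fuel cur acc _
    cases fuel <;> simp [PySem.Chars.splitOn.go, mySplit]
  | cons c rest ih =>
    intro fuel cur acc hf
    cases fuel with
    | zero => simp at hf
    | succ n =>
      simp only [PySem.Chars.splitOn.go]
      by_cases hc : c = ','
      · subst hc
        rw [if_pos (by simp)]
        simp only [List.length_cons] at hf
        simp only [List.length_cons, List.length_nil, List.drop_succ_cons, List.drop_zero]
        rw [ih n [] (cur.reverse :: acc) (by omega)]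
        simp [mySplit, List.modifyHead]
        cases h : mySplit rest with
        | nil => exact absurd h (mySplit_ne_nil rest)
        | cons a t => simp
      · rw [if_neg (by
          simp only [List.isPrefixOf, Bool.and_eq_true, beq_iff_eq, and_true]
          exact fun h => hc h.symm)]
        simp only [List.length_cons] at hf
        rw [ih n (c :: cur) acc (by omega)]
        simp only [mySplit, if_neg hc]
        congr 1
        cases h : mySplit rest with
        | nil => exact absurd h (mySplit_ne_nil rest)
        | cons a t => simp

theorem splitOn_comma (s : List Char) : PySem.Chars.splitOn s [','] = mySplit s := by
  rw [PySem.Chars.splitOn, splitOn_go_comma s (s.length + 1) [] [] (by omega)]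
  cases h : mySplit s with
  | nil => exact absurd h (mySplit_ne_nil s)
  | cons a t => simp

theorem mySplit_no_comma (s : List Char) (h : ',' ∉ s) : mySplit s = [s] := by
  induction s with
  | nil => simp [mySplit]
  | cons c rest ih =>
    simp only [List.mem_cons, not_or] at h
    simp [mySplit, Ne.symm h.1, ih h.2, List.modifyHead]

-- the strip-and-filter pass, on the char level
def charProc (ps : List (List Char)) : List (List Char) :=
  (ps.filter (fun c => decide (PySem.Chars.strip c ≠ []))).map PySem.Chars.strip

theorem sproc_map_ofList (ps : List (List Char)) :
    ((ps.map String.ofList).filter (fun x => decide (PySem.Str.strip x ≠ ""))).map PySem.Str.strip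
      = (charProc ps).map String.ofList := by
  have hstrip : ∀ c : List Char, PySem.Str.strip (String.ofList c) = String.ofList (PySem.Chars.strip c) := by
    intro c
    apply String.toList_injective
    simp [PySem.Str.toList_strip]
  have hne : ∀ c : List Char, (decide (PySem.Str.strip (String.ofList c) ≠ "")) = decide (PySem.Chars.strip c ≠ []) := by
    intro c
    rw [hstrip]
    have h0 : String.ofList ([] : List Char) = "" := rfl
    by_cases h : PySem.Chars.strip c = []
    · simp [h, h0]
    · have : String.ofList (PySem.Chars.strip c) ≠ "" := by
        intro he
        apply h
        have := congrArg String.toList he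
        simpa using this
      simp [this, h]
  simp only [charProc, List.filter_map, List.map_map]
  rw [List.filter_congr (l := ps) (q := fun c => decide (PySem.Chars.strip c ≠ []))
      (by intro c _; simpa [Function.comp] using hne c)]
  exact List.map_congr_left (by intro c _; simpa [Function.comp] using hstrip c)

theorem parts_eq (e : String) :
    (if PySem.Str.isIn "," e = false then [e] else (PySem.Str.split? e ",").getD [])
      = (mySplit e.toList).map String.ofList := by
  have hsplit : (PySem.Str.split? e ",").getD [] = (mySplit e.toList).map String.ofList := by
    have h := PySem.Str.split?_map e ","
    rw [PySem.Chars.split?] at h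
    rw [if_neg (by decide)] at h
    have hson : (",".toList : List Char) = [','] := by decide
    rw [hson, splitOn_comma] at h
    cases hx : PySem.Str.split? e "," with
    | none => rw [hx] at h; simp at h
    | some xs =>
      rw [hx] at h
      simp only [Option.map_some, Option.some.injEq] at h
      simp only [Option.getD_some]
      rw [← h, List.map_map]
      simp [Function.comp_def]
  by_cases hin : PySem.Str.isIn "," e = false
  · rw [if_pos hin]
    have : (',' : Char) ∉ e.toList := by
      intro hmem
      have : PySem.Str.isIn "," e = true := by
        rw [PySem.Str.isIn_iff_infix]
        have hson : (",".toList : List Char) = [','] := by decide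
        rw [hson, List.singleton_infix_iff]
        exact hmem
      rw [this] at hin
      simp at hin
    rw [mySplit_no_comma _ this]
    simp [String.ofList_toList]
  · rw [if_neg hin]
    exact hsplit

-- A's outer loop over the entries, with its nested split-and-append inner loop, is a flatMap
theorem A_outer (l : List String) (acc : List String) :
    l.foldl (fun values entry =>
        List.foldl (fun values part => if PySem.Str.strip part ≠ "" then values ++ [PySem.Str.strip part] else values)
          values (if PySem.Str.isIn "," entry = false then [entry] else (PySem.Str.split? entry ",").getD [])) acc
      = acc ++ l.flatMap (fun e =>
          ((if PySem.Str.isIn "," e = false then [e] else (PySem.Str.split? e ",").getD []).filter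
              (fun x => decide (PySem.Str.strip x ≠ ""))).map PySem.Str.strip) := by
  induction l generalizing acc with
  | nil => simp
  | cons e rest ih =>
    simp only [List.foldl_cons, List.flatMap_cons, ih]
    rw [PySem.List.foldl_append_ite (p := fun x => PySem.Str.strip x ≠ "") (f := PySem.Str.strip)]
    simp

-- ===== B-side lemmas: the tokenizer computes charProc ∘ mySplit =====

def optFlush (t : List Char) : List String := if t ≠ [] then [String.ofList t] else []

def finalizeB (st : List String × List Char × List Char) : List String :=
  st.1 ++ optFlush st.2.1

-- rstrip of a list with an all-whitespace suffix glued on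
theorem rstrip_append_ws (t ws : List Char) (h : ∀ c ∈ ws, PySem.Chars.isspace c = true) :
    PySem.Chars.rstrip (t ++ ws) = PySem.Chars.rstrip t := by
  simp only [PySem.Chars.rstrip, List.reverse_append]
  rw [List.dropWhile_append]
  have : List.dropWhile PySem.Chars.isspace ws.reverse = [] := by
    rw [List.dropWhile_eq_nil_iff]
    intro c hc; exact h c (List.mem_reverse.mp hc)
  simp [this]

theorem rstrip_snoc_nonspace (t : List Char) (c : Char) (h : PySem.Chars.isspace c = false) :
    PySem.Chars.rstrip (t ++ [c]) = t ++ [c] := by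
  simp [PySem.Chars.rstrip, h]

theorem strip_cons_space (c : Char) (s : List Char) (h : PySem.Chars.isspace c = true) :
    PySem.Chars.strip (c :: s) = PySem.Chars.strip s := by
  simp [PySem.Chars.strip, PySem.Chars.lstrip, List.dropWhile, h]

theorem strip_cons_nonspace (c : Char) (s : List Char) (h : PySem.Chars.isspace c = false) :
    PySem.Chars.strip (c :: s) = PySem.Chars.rstrip (c :: s) := by
  simp [PySem.Chars.strip, PySem.Chars.lstrip, List.dropWhile, h]

-- the accumulator of values is only appended to
theorem scanB_values (s : List Char) : ∀ (values : List String) (token ws : List Char),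
    scanB s (values, token, ws)
      = (values ++ (scanB s ([], token, ws)).1,
         (scanB s ([], token, ws)).2.1, (scanB s ([], token, ws)).2.2) := by
  induction s with
  | nil => intro values token ws; simp [scanB]
  | cons c rest ih =>
    intro values token ws
    simp only [scanB]
    by_cases h1 : c = ','
    · rw [if_pos h1, if_pos h1,
        ih (if token ≠ [] then values ++ [String.ofList token] else values),
        ih (if token ≠ [] then [] ++ [String.ofList token] else [])]
      split_ifs <;> simp
    · rw [if_neg h1, if_neg h1]
      by_cases h2 : PySem.Chars.isspace c = true
      · rw [if_pos h2, if_pos h2]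
        exact ih values token (if token ≠ [] then ws ++ [c] else ws)
      · rw [if_neg h2, if_neg h2]
        exact ih values (token ++ ws ++ [c]) []

-- main invariant: scanning from a well-formed (token, ws) state produces the
-- stripped tokens of the comma-separated segments
theorem scanB_main (s : List Char) : ∀ (token ws : List Char),
    (∀ c ∈ ws, PySem.Chars.isspace c = true) →
    PySem.Chars.rstrip token = token →
    (token = [] → ws = []) →
    finalizeB (scanB s ([], token, ws))
      = optFlush (if token = [] then PySem.Chars.strip (mySplit s).headI
                  else PySem.Chars.rstrip (token ++ ws ++ (mySplit s).headI))
        ++ (charProc (mySplit s).tail).map String.ofList := by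
  induction s with
  | nil =>
    intro token ws hws hrs hinv
    by_cases ht : token = []
    · subst ht
      simp [scanB, finalizeB, mySplit, charProc, optFlush, hinv rfl, PySem.Chars.strip,
        PySem.Chars.lstrip, PySem.Chars.rstrip]
    · have h2 : PySem.Chars.rstrip (token ++ ws) = token := by
        rw [rstrip_append_ws token ws hws, hrs]
      simp [scanB, finalizeB, mySplit, charProc, optFlush, ht, h2]
  | cons c rest ih =>
    intro token ws hws hrs hinv
    obtain ⟨h, t, hsplit⟩ : ∃ h t, mySplit rest = h :: t := by
      cases hx : mySplit rest with
      | nil => exact absurd hx (mySplit_ne_nil rest)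
      | cons a b => exact ⟨a, b, rfl⟩
    have hcp : ∀ u : List Char, (charProc (u :: t)).map String.ofList
        = optFlush (PySem.Chars.strip u) ++ (charProc t).map String.ofList := by
      intro u
      by_cases hh : PySem.Chars.strip u = []
      · simp [charProc, optFlush, hh]
      · simp [charProc, optFlush, hh]
    by_cases hc : c = ','
    · subst hc
      have hstep : scanB (',' :: rest) (([] : List String), token, ws)
          = scanB rest ((if token ≠ [] then [] ++ [String.ofList token] else []), [], []) := rfl
      have hrec := ih [] [] (by simp) (by simp [PySem.Chars.rstrip]) (fun _ => rfl)
      rw [hsplit] at hrec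
      simp only [List.headI, List.tail] at hrec
      simp only [reduceIte] at hrec
      simp only [finalizeB] at hrec
      have hms : mySplit (',' :: rest) = [] :: mySplit rest := by simp [mySplit]
      rw [hstep, scanB_values, hms, hsplit]
      simp only [List.headI, List.tail, finalizeB]
      rw [hcp h]
      have hstrip0 : PySem.Chars.strip ([] : List Char) = [] := rfl
      by_cases ht : token = []
      · simp only [ht, ne_eq, not_true_eq_false, if_false, reduceIte,
          hstrip0, List.nil_append]
        rw [hrec]
        simp [optFlush]
      · have htok : PySem.Chars.rstrip (token ++ ws) = token := by
          rw [rstrip_append_ws token ws hws, hrs]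
        simp only [ne_eq, ht, not_false_eq_true, if_true, List.append_nil,
          List.nil_append, List.append_assoc, htok]
        rw [hrec]
        simp [optFlush, ht]
    · have hms : mySplit (c :: rest) = (mySplit rest).modifyHead (c :: ·) := by
        simp [mySplit, hc]
      by_cases hsp : PySem.Chars.isspace c = true
      · -- whitespace char: goes to the pending buffer (or is dropped before a token starts)
        simp only [scanB]
        rw [if_neg hc, if_pos hsp, hms, hsplit]
        simp only [List.modifyHead, List.headI, List.tail]
        by_cases ht : token = []
        · have hws0 : ws = [] := hinv ht
          subst ht; subst hws0
          simp only [reduceIte]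
          have hrec := ih [] [] (by simp) hrs (fun _ => rfl)
          rw [hsplit] at hrec
          simp only [List.headI, List.tail] at hrec
          simp only [reduceIte] at hrec
          rw [strip_cons_space c h hsp]
          exact hrec
        · rw [if_pos ht]
          have hrec := ih token (ws ++ [c])
              (by intro x hx; rcases List.mem_append.mp hx with h' | h'
                  · exact hws x h'
                  · simp at h'; subst h'; exact hsp)
              hrs (fun he => absurd he ht)
          rw [hsplit] at hrec
          simp only [List.headI, List.tail] at hrec
          rw [if_neg ht] at hrec
          rw [if_neg ht]
          have hassoc : token ++ (ws ++ [c]) ++ h = token ++ ws ++ (c :: h) := by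
            simp
          rw [hassoc] at hrec
          exact hrec
      · -- ordinary char: commit pending whitespace and the char
        have hsp' : PySem.Chars.isspace c = false := by simpa using hsp
        simp only [scanB]
        rw [if_neg hc, if_neg hsp, hms, hsplit]
        simp only [List.modifyHead, List.headI, List.tail]
        have hne : token ++ ws ++ [c] ≠ [] := by simp
        have hrec := ih (token ++ ws ++ [c]) []
            (by simp)
            (rstrip_snoc_nonspace (token ++ ws) c hsp')
            (fun he => absurd he hne)
        rw [hsplit] at hrec
        simp only [List.headI, List.tail] at hrec
        rw [if_neg hne] at hrec
        by_cases ht : token = []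
        · have hws0 : ws = [] := hinv ht
          subst ht; subst hws0
          simp only [reduceIte]
          rw [strip_cons_nonspace c h hsp']
          simpa using hrec
        · rw [if_neg ht]
          have hassoc : token ++ ws ++ [c] ++ [] ++ h = token ++ ws ++ (c :: h) := by
            simp
          rw [hassoc] at hrec
          exact hrec

-- per entry, from the reset state, B emits exactly charProc ∘ mySplit
theorem scanB_entry (e : String) :
    finalizeB (scanB e.toList ([], [], [])) = (charProc (mySplit e.toList)).map String.ofList := by
  rw [scanB_main e.toList [] [] (by simp) (by simp [PySem.Chars.rstrip]) (fun _ => rfl)]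
  obtain ⟨h, t, hsplit⟩ : ∃ h t, mySplit e.toList = h :: t := by
    cases hx : mySplit e.toList with
    | nil => exact absurd hx (mySplit_ne_nil _)
    | cons a b => exact ⟨a, b, rfl⟩
  rw [hsplit]
  simp only [List.headI, List.tail]
  simp only [reduceIte]
  by_cases hh : PySem.Chars.strip h = []
  · simp [charProc, optFlush, hh]
  · simp [charProc, optFlush, hh]

-- B's outer foldl over the entries
theorem B_outer (l : List String) : ∀ (values : List String),
    (l.foldl (fun st entry =>
        match scanB entry.toList st with
        | (values, token, _ws) =>
          ((if token ≠ [] then values ++ [String.ofList token] else values), ([] : List Char), ([] : List Char)))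
      (values, ([] : List Char), ([] : List Char))).1
      = values ++ l.flatMap (fun e => (charProc (mySplit e.toList)).map String.ofList) := by
  induction l with
  | nil => intro values; simp
  | cons e rest ih =>
    intro values
    simp only [List.foldl_cons, List.flatMap_cons]
    rw [scanB_values]
    have hstep : (if (scanB e.toList ([], [], [])).2.1 ≠ [] then
          values ++ (scanB e.toList ([], [], [])).1 ++ [String.ofList (scanB e.toList ([], [], [])).2.1]
        else values ++ (scanB e.toList ([], [], [])).1)
        = values ++ finalizeB (scanB e.toList ([], [], [])) := by
      simp only [finalizeB, optFlush]
      split_ifs <;> simp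
    simp only [hstep, scanB_entry e, ih]
    simp

-- ===== VERDICT (by name: the statement is the Claim_ definition above) =====
theorem coerce_filter_list_py_spec : Claim_equal_coerce_filter_list_py := by
  intro raw _
  unfold Spec_coerce_filter_list_py coerce_filter_list_py coerce_filter_list_py_alt
  cases raw with
  | none => rfl
  | some l =>
    by_cases hl : l = []
    · simp [hl]
    · simp only [if_neg hl]
      rw [A_outer l [], B_outer l []]
      simp only [List.nil_append]
      exact List.flatMap_congr (fun e _ => by rw [parts_eq, sproc_map_ofList])
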